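-- pv_equiv track=rewrite | github.com/sergioibarra98/LibSpice | Tools/BomCompare/bomcompare.py | compare_boms
-- ===== SOURCE A (Python) =====
-- def compare_boms(bom_v0, bom_v1):
--     modified = {}
--     added = {}
--     removed = {}
--
--     for ref, data in bom_v0.items():
--         if ref in bom_v1:
--             changes = {}
--             for key in data.keys():
--                 if data[key] != bom_v1[ref].get(key, ''):
--                     changes[key] = {'V0': data[key], 'V1': bom_v1[ref].get(key, '')}
--             if changes:
--                 modified[ref] = changes
--         else:
--             removed[ref] = data
--
--     for ref, data in bom_v1.items():
--         if ref not in bom_v0: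
--             added[ref] = data
--
--     return modified, added, removed
-- ===== SOURCE B (Python) =====
-- def _diff_fields(d0, d1):
--     # merge-join on field keys: pair each v0 field with its v1 counterpart first,
--     # then emit the unequal pairs
--     fields = {}
--     for key, val in d0.items():
--         fields[key] = (val, '')
--     for key, val in d1.items():
--         if key in fields:
--             fields[key] = (fields[key][0], val)
--     changes = {}
--     for key, pair in fields.items():
--         if pair[0] != pair[1]:
--             changes[key] = {'V0': pair[0], 'V1': pair[1]}
--     return changes
--
--
-- def compare_boms(bom_v0, bom_v1):
--     # phase 1: merge both BOMs into one slot table ref -> (v0 part or None, v1 part or None)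
--     slots = {}
--     for ref, data in bom_v0.items():
--         slots[ref] = (data, None)
--     for ref, data in bom_v1.items():
--         if ref in slots:
--             slots[ref] = (slots[ref][0], data)
--         else:
--             slots[ref] = (None, data)
--     # phase 2: classify each slot; no membership tests against either BOM needed
--     modified = {}
--     added = {}
--     removed = {}
--     for ref, slot in slots.items():
--         d0, d1 = slot
--         if d0 is None:
--             added[ref] = d1
--         elif d1 is None:
--             removed[ref] = d0
--         else:
--             changes = _diff_fields(d0, d1)
--             if changes:
--                 modified[ref] = changes
--     return modified, added, removed
-- ===== Notes on version B (the rewrite author's own statement) =====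
-- stated objective: alternative
-- what changed: Replaces A's per-ref membership tests against the other BOM by a two-phase merge-join: both BOMs (and, inside, both field dicts) are first merged into one slot table ref -> (v0 part, v1 part), which a single classification pass then partitions into modified/added/removed without ever consulting the original dicts.
import Mathlib
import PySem

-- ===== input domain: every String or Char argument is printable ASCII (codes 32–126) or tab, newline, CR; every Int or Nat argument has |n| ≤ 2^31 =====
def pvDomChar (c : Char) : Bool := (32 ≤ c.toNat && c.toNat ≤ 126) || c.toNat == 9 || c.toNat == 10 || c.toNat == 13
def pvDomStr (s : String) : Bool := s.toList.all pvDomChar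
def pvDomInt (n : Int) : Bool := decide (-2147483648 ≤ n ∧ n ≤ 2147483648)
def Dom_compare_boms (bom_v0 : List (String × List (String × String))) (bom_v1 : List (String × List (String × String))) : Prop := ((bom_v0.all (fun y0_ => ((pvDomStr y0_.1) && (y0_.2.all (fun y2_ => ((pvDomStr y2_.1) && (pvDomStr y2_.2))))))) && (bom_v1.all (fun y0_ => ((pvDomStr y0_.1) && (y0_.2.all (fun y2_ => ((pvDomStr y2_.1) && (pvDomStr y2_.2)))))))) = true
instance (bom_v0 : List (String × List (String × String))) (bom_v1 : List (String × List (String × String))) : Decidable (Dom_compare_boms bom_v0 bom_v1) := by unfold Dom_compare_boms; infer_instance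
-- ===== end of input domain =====

-- B replaces A's per-ref membership tests by a two-phase merge-join: one slot table
-- ref -> (v0 part, v1 part) built first, then a single classification pass (objective: alternative).


-- ===== PORT A =====
-- inner loop of A: changes = {}; for key in data.keys(): if data[key] != bom_v1[ref].get(key, ''): changes[key] = {...}
def aChanges (data : PySem.Dict String String) (other : PySem.Dict String String) :
    PySem.Dict String (List (String × String)) :=
  data.keys.foldl
    (fun ch key =>
      if data.getD key "" ≠ other.getD key "" then
        ch.insert key [("V0", data.getD key ""), ("V1", other.getD key "")]
      else ch)
    PySem.Dict.empty

def compare_boms (bom_v0 : List (String × List (String × String))) (bom_v1 : List (String × List (String × String))) : (List (String × List (String × List (String × String)))) × (List (String × List (String × String))) × (List (String × List (String × String))) :=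
  let d1 : PySem.Dict String (List (String × String)) := PySem.Dict.mk bom_v1
  let mr := bom_v0.foldl
    (fun (mr : PySem.Dict String (List (String × List (String × String))) ×
               PySem.Dict String (List (String × String))) rd =>
      if d1.contains rd.1 then
        let changes := aChanges (PySem.Dict.mk rd.2) (PySem.Dict.mk (d1.getD rd.1 []))
        if changes.items ≠ [] then (mr.1.insert rd.1 changes.items, mr.2) else mr
      else (mr.1, mr.2.insert rd.1 rd.2))
    (PySem.Dict.empty, PySem.Dict.empty)
  let added := bom_v1.foldl
    (fun (a : PySem.Dict String (List (String × String))) rd =>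
      if (PySem.Dict.mk bom_v0).contains rd.1 then a else a.insert rd.1 rd.2)
    PySem.Dict.empty
  (mr.1.items, added.items, mr.2.items)

-- ===== PORT B =====
-- _diff_fields: merge-join the two field dicts into key -> (v0 value, v1 value or ''), then emit unequal pairs
def diffFields (d0 : List (String × String)) (d1 : List (String × String)) :
    List (String × List (String × String)) :=
  let fields := d0.foldl (fun f kv => f.insert kv.1 (kv.2, "")) PySem.Dict.empty
  let fields := d1.foldl
    (fun f kv => if f.contains kv.1 then f.insert kv.1 ((f.getD kv.1 ("", "")).1, kv.2) else f)
    fields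
  let changes := fields.items.foldl
    (fun c kp =>
      if kp.2.1 ≠ kp.2.2 then c.insert kp.1 [("V0", kp.2.1), ("V1", kp.2.2)] else c)
    (PySem.Dict.empty : PySem.Dict String (List (String × String)))
  changes.items

-- phase 1 merges both BOMs into one slot table; phase 2 classifies each slot
def compare_boms_alt (bom_v0 : List (String × List (String × String))) (bom_v1 : List (String × List (String × String))) : (List (String × List (String × List (String × String)))) × (List (String × List (String × String))) × (List (String × List (String × String))) :=
  let slots : PySem.Dict String (Option (List (String × String)) × Option (List (String × String))) :=
    bom_v0.foldl (fun s rd => s.insert rd.1 (some rd.2, none)) PySem.Dict.empty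
  let slots := bom_v1.foldl
    (fun s rd =>
      if s.contains rd.1 then s.insert rd.1 ((s.getD rd.1 (none, none)).1, some rd.2)
      else s.insert rd.1 (none, some rd.2))
    slots
  let mar := slots.items.foldl
    (fun (acc : PySem.Dict String (List (String × List (String × String))) ×
                PySem.Dict String (List (String × String)) ×
                PySem.Dict String (List (String × String))) kp =>
      match kp.2.1, kp.2.2 with
      | none, o1 => (acc.1, acc.2.1.insert kp.1 (o1.getD []), acc.2.2)
      | some p0, none => (acc.1, acc.2.1, acc.2.2.insert kp.1 p0)
      | some p0, some p1 =>
        let changes := diffFields p0 p1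
        if changes ≠ [] then (acc.1.insert kp.1 changes, acc.2.1, acc.2.2) else acc)
    (PySem.Dict.empty, PySem.Dict.empty, PySem.Dict.empty)
  (mar.1.items, mar.2.1.items, mar.2.2.items)

-- ===== PRECONDITION & SPEC =====
-- Pre_ excludes association lists with duplicate keys (at the ref level or inside a part
-- record): such lists do not arise from Python dicts, and on them the Dict-overwrite
-- order of either port is accidental.
def Pre_compare_boms (bom_v0 : List (String × List (String × String))) (bom_v1 : List (String × List (String × String))) : Prop :=
  (bom_v0.map Prod.fst).Nodup ∧ (bom_v1.map Prod.fst).Nodup ∧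
    (∀ rd ∈ bom_v0, (rd.2.map Prod.fst).Nodup) ∧ (∀ rd ∈ bom_v1, (rd.2.map Prod.fst).Nodup)
instance (bom_v0 : List (String × List (String × String))) (bom_v1 : List (String × List (String × String))) : Decidable (Pre_compare_boms bom_v0 bom_v1) := by unfold Pre_compare_boms; infer_instance

def pvWitness_compare_boms : (List (String × List (String × String))) × (List (String × List (String × String))) :=
  ([("R1", [("val", "10k"), ("fp", "0603")]), ("R2", [("val", "1k")])],
   [("R1", [("val", "12k"), ("fp", "0603")]), ("C1", [("val", "1n")])])

def Spec_compare_boms (bom_v0 : List (String × List (String × String))) (bom_v1 : List (String × List (String × String))) (out : (List (String × List (String × List (String × String)))) × (List (String × List (String × String))) × (List (String × List (String × String)))) : Prop := out = compare_boms_alt bom_v0 bom_v1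
instance (bom_v0 : List (String × List (String × String))) (bom_v1 : List (String × List (String × String))) (out : (List (String × List (String × List (String × String)))) × (List (String × List (String × String))) × (List (String × List (String × String)))) : Decidable (Spec_compare_boms bom_v0 bom_v1 out) := by
  unfold Spec_compare_boms
  exact @instDecidableEqProd _ _ (fun a b => by infer_instance)
    (@instDecidableEqProd _ _ (fun a b => by infer_instance) (fun a b => by infer_instance)) _ _

-- ===== CLAIM (what is proved, stated in full; the proofs are below) =====
def Claim_equal_compare_boms : Prop := ∀ (bom_v0 : List (String × List (String × String))) (bom_v1 : List (String × List (String × String))), Dom_compare_boms bom_v0 bom_v1 → Pre_compare_boms bom_v0 bom_v1 → Spec_compare_boms bom_v0 bom_v1 (compare_boms bom_v0 bom_v1)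

-- ===== LEMMAS AND PROOFS =====

theorem get?_mk_append {ν : Type} (l m : List (String × ν)) (x : String) :
    (PySem.Dict.mk (l ++ m)).get? x
      = ((PySem.Dict.mk l).get? x).or ((PySem.Dict.mk m).get? x) := by
  show Option.map _ (List.find? _ (l ++ m)) = _
  rw [List.find?_append]
  rcases h : List.find? (fun p => p.1 == x) l with _ | p <;>
    simp [PySem.Dict.get?, h, Option.or]

theorem get?_mk_snoc_self {ν : Type} (l : List (String × ν)) (k : String) (v : ν)
    (h : k ∉ l.map Prod.fst) : (PySem.Dict.mk (l ++ [(k, v)])).get? k = some v := by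
  rw [get?_mk_append]
  have hn : (PySem.Dict.mk l).get? k = none := by
    rw [PySem.Dict.get?_eq_none_iff_not_mem_keys, PySem.Dict.keys_mk]
    simpa using h
  rw [hn, PySem.Dict.get?_mk_cons]
  simp [Option.or]

theorem get?_mk_snoc_ne {ν : Type} (l : List (String × ν)) (k : String) (v : ν)
    (x : String) (h : x ≠ k) : (PySem.Dict.mk (l ++ [(k, v)])).get? x = (PySem.Dict.mk l).get? x := by
  rw [get?_mk_append]
  have hb : (k == x) = false := by simpa [beq_eq_false_iff_ne] using fun hh => h hh.symm
  rw [PySem.Dict.get?_mk_cons]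
  rcases hh : (PySem.Dict.mk l).get? x with _ | w <;>
    simp [hb, Option.or, PySem.Dict.get?]

theorem contains_mk_iff {ν : Type} (l : List (String × ν)) (x : String) :
    (PySem.Dict.mk l).contains x = true ↔ x ∈ l.map Prod.fst := by
  rw [PySem.Dict.contains_mk]
  simp [List.any_eq_true, List.mem_map]

theorem fields_items (d0 d1 : List (String × String))
    (h0 : (d0.map Prod.fst).Nodup) (h1 : (d1.map Prod.fst).Nodup) :
    (d1.foldl
      (fun (f : PySem.Dict String (String × String)) kv =>
        if f.contains kv.1 then f.insert kv.1 ((f.getD kv.1 ("", "")).1, kv.2) else f)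
      (d0.foldl (fun f kv => f.insert kv.1 (kv.2, "")) PySem.Dict.empty)).items
    = d0.map (fun kv => (kv.1, (kv.2, (PySem.Dict.mk d1).getD kv.1 ""))) := by
  induction d1 using List.reverseRecOn with
  | nil =>
    simp only [List.foldl_nil]
    rw [PySem.Dict.items_foldl_insert_fresh d0 Prod.fst (fun kv => (kv.2, ""))
      PySem.Dict.empty (fun a _ => PySem.Dict.contains_empty _) h0]
    simp [PySem.Dict.getD, PySem.Dict.get?]
    rfl
  | append_singleton l a ih =>
    obtain ⟨ka, va⟩ := a
    rw [List.map_append, List.nodup_append] at h1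
    obtain ⟨hl, -, hdisj⟩ := h1
    have hal : ka ∉ l.map Prod.fst := fun hmem => hdisj ka hmem ka (by simp) rfl
    have ihh := ih hl
    rw [List.foldl_append]
    set F := l.foldl
      (fun (f : PySem.Dict String (String × String)) kv =>
        if f.contains kv.1 then f.insert kv.1 ((f.getD kv.1 ("", "")).1, kv.2) else f)
      (d0.foldl (fun f kv => f.insert kv.1 (kv.2, "")) PySem.Dict.empty) with hF
    have hkeys : F.keys = d0.map Prod.fst := by
      simp [PySem.Dict.keys, ihh]
    have hknd : F.keys.Nodup := by rw [hkeys]; exact h0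
    simp only [List.foldl_cons, List.foldl_nil]
    by_cases hc : F.contains ka
    · rw [if_pos hc, PySem.Dict.items_insert_of_contains _ _ hc, ihh, List.map_map]
      refine List.map_congr_left ?_
      rintro ⟨k, v⟩ hkv
      by_cases hk : k = ka
      · subst hk
        have hmem : (k, (v, (PySem.Dict.mk l).getD k "")) ∈ F.items := by
          rw [ihh]; exact List.mem_map.mpr ⟨(k, v), hkv, rfl⟩
        have hgd : F.getD k ("", "") = (v, (PySem.Dict.mk l).getD k "") :=
          PySem.Dict.getD_of_mem_items F hmem hknd _
        have hrhs : (PySem.Dict.mk (l ++ [(k, va)])).getD k "" = va := by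
          rw [PySem.Dict.getD_eq_get?_getD, get?_mk_snoc_self l k va hal]; rfl
        simp [Function.comp, hgd, hrhs]
      · have hb : (k == ka) = false := by simpa [beq_eq_false_iff_ne] using hk
        simp [Function.comp, hb, PySem.Dict.getD_eq_get?_getD, get?_mk_snoc_ne l ka va k hk]
    · rw [if_neg hc, ihh]
      refine List.map_congr_left ?_
      rintro ⟨k, v⟩ hkv
      have hk : k ≠ ka := by
        intro hh
        exact hc (by
          rw [PySem.Dict.contains_iff_mem_keys, hkeys, ← hh]
          exact List.mem_map.mpr ⟨(k, v), hkv, rfl⟩)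
      simp [PySem.Dict.getD_eq_get?_getD, get?_mk_snoc_ne l ka va k hk]

theorem slots_items (bom_v0 bom_v1 : List (String × List (String × String)))
    (h0 : (bom_v0.map Prod.fst).Nodup) (h1 : (bom_v1.map Prod.fst).Nodup) :
    (bom_v1.foldl
      (fun (s : PySem.Dict String (Option (List (String × String)) × Option (List (String × String)))) rd =>
        if s.contains rd.1 then s.insert rd.1 ((s.getD rd.1 (none, none)).1, some rd.2)
        else s.insert rd.1 (none, some rd.2))
      (bom_v0.foldl (fun s rd => s.insert rd.1 (some rd.2, none)) PySem.Dict.empty)).items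
    = bom_v0.map (fun rd => (rd.1, (some rd.2, (PySem.Dict.mk bom_v1).get? rd.1)))
      ++ (bom_v1.filter (fun rd => (PySem.Dict.mk bom_v0).contains rd.1 = false)).map
          (fun rd => (rd.1, ((none : Option (List (String × String))), some rd.2))) := by
  induction bom_v1 using List.reverseRecOn with
  | nil =>
    simp only [List.foldl_nil, List.filter_nil, List.map_nil, List.append_nil]
    rw [PySem.Dict.items_foldl_insert_fresh bom_v0 Prod.fst (fun rd => (some rd.2, none))
      PySem.Dict.empty (fun a _ => PySem.Dict.contains_empty _) h0]
    simp [PySem.Dict.get?]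
    rfl
  | append_singleton l a ih =>
    obtain ⟨ka, pa⟩ := a
    rw [List.map_append, List.nodup_append] at h1
    obtain ⟨hl, -, hdisj⟩ := h1
    have hal : ka ∉ l.map Prod.fst := fun hmem => hdisj ka hmem ka (by simp) rfl
    have ihh := ih hl
    rw [List.foldl_append]
    set F := l.foldl
      (fun (s : PySem.Dict String (Option (List (String × String)) × Option (List (String × String)))) rd =>
        if s.contains rd.1 then s.insert rd.1 ((s.getD rd.1 (none, none)).1, some rd.2)
        else s.insert rd.1 (none, some rd.2))
      (bom_v0.foldl (fun s rd => s.insert rd.1 (some rd.2, none)) PySem.Dict.empty) with hF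
    have hkeys : F.keys = bom_v0.map Prod.fst
        ++ (l.filter (fun rd => (PySem.Dict.mk bom_v0).contains rd.1 = false)).map Prod.fst := by
      rw [show F.keys = F.items.map Prod.fst from rfl, ihh]
      simp [Function.comp_def]
    have hdisj2 : ∀ x ∈ bom_v0.map Prod.fst,
        x ∉ (l.filter (fun rd => (PySem.Dict.mk bom_v0).contains rd.1 = false)).map Prod.fst := by
      intro x hx hy
      obtain ⟨rd, hrd, hrdx⟩ := List.mem_map.mp hy
      have hcf := (List.mem_filter.mp hrd).2
      simp only [decide_eq_true_eq] at hcf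
      rw [hrdx] at hcf
      have : (PySem.Dict.mk bom_v0).contains x = true := (contains_mk_iff bom_v0 x).mpr hx
      rw [this] at hcf
      exact Bool.noConfusion hcf
    have hknd : F.keys.Nodup := by
      rw [hkeys, List.nodup_append]
      refine ⟨h0, (List.filter_sublist.map Prod.fst).nodup hl, ?_⟩
      intro x hx y hy hxy
      exact hdisj2 x hx (hxy ▸ hy)
    have hmemkeys : ∀ x, F.contains x = true ↔
        x ∈ bom_v0.map Prod.fst ∨ x ∈ (l.filter (fun rd => (PySem.Dict.mk bom_v0).contains rd.1 = false)).map Prod.fst := by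
      intro x
      rw [PySem.Dict.contains_iff_mem_keys, hkeys, List.mem_append]
    simp only [List.foldl_cons, List.foldl_nil]
    have hnotl : ka ∉ (l.filter (fun rd => (PySem.Dict.mk bom_v0).contains rd.1 = false)).map Prod.fst := by
      intro hmem
      obtain ⟨rd, hrd, hrdx⟩ := List.mem_map.mp hmem
      exact hal (List.mem_map.mpr ⟨rd, (List.mem_filter.mp hrd).1, hrdx⟩)
    by_cases hc : F.contains ka
    · have hka0 : ka ∈ bom_v0.map Prod.fst := by
        rcases (hmemkeys ka).mp hc with h | h
        · exact h
        · exact absurd h hnotl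
      have hfa : (PySem.Dict.mk bom_v0).contains ka = true := (contains_mk_iff bom_v0 ka).mpr hka0
      rw [if_pos hc, PySem.Dict.items_insert_of_contains _ _ hc, ihh, List.map_append,
        List.filter_append]
      simp only [List.filter_cons, List.filter_nil, hfa]
      norm_num
      congr 1
      · refine List.map_congr_left ?_
        rintro ⟨k, p⟩ hkv
        by_cases hk : k = ka
        · subst hk
          have hmem : (k, (some p, (PySem.Dict.mk l).get? k)) ∈ F.items := by
            rw [ihh]
            exact List.mem_append_left _ (List.mem_map.mpr ⟨(k, p), hkv, rfl⟩)
          have hgd : F.getD k (none, none) = (some p, (PySem.Dict.mk l).get? k) :=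
            PySem.Dict.getD_of_mem_items F hmem hknd _
          have hrhs : (PySem.Dict.mk (l ++ [(k, pa)])).get? k = some pa :=
            get?_mk_snoc_self l k pa hal
          simp [Function.comp, hgd, hrhs]
        · simp [Function.comp, hk, get?_mk_snoc_ne l ka pa k hk]
      · refine List.map_congr_left ?_
        rintro ⟨k, p⟩ hkv
        have hcf : (bom_v0.any fun q => q.1 == k) = false := by
          simpa using (List.mem_filter.mp hkv).2
        have hkne : k ≠ ka := by
          rintro rfl
          obtain ⟨rv, hrv, hrvx⟩ := List.mem_map.mp hka0
          have := List.any_eq_false.mp hcf rv hrv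
          exact this (by simp [hrvx])
        simp [Function.comp, hkne]
    · have hka0 : ka ∉ bom_v0.map Prod.fst := fun h => hc ((hmemkeys ka).mpr (Or.inl h))
      have hfa : (PySem.Dict.mk bom_v0).contains ka = false := by
        rcases hh : (PySem.Dict.mk bom_v0).contains ka with _ | _
        · rfl
        · exact absurd ((contains_mk_iff bom_v0 ka).mp hh) hka0
      rw [if_neg hc, PySem.Dict.items_insert_of_not_contains _ _ (by simpa using hc), ihh,
        List.filter_append]
      simp only [List.filter_cons, List.filter_nil, hfa]
      norm_num
      intro k p hkp
      have hkne : k ≠ ka := by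
        rintro rfl
        exact hka0 (List.mem_map.mpr ⟨(k, p), hkp, rfl⟩)
      exact (get?_mk_snoc_ne l ka pa k hkne).symm

theorem foldl_insert_if_items {α ν : Type} (l : List α) (key : α → String)
    (p : α → Prop) [DecidablePred p] (f : α → ν) (d : PySem.Dict String ν)
    (hnd : (l.map key).Nodup) (hfresh : ∀ a ∈ l, d.contains (key a) = false) :
    (l.foldl (fun d a => if p a then d.insert (key a) (f a) else d) d).items
      = d.items ++ (l.filter (fun a => decide (p a))).map (fun a => (key a, f a)) := by
  induction l generalizing d with
  | nil => simp
  | cons a l ih =>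
    simp only [List.map_cons, List.nodup_cons, List.mem_map] at hnd
    obtain ⟨hna, hnd⟩ := hnd
    by_cases hp : p a
    · have hfa : d.contains (key a) = false := hfresh a (by simp)
      have hfresh' : ∀ b ∈ l, (d.insert (key a) (f a)).contains (key b) = false := by
        intro b hb
        rw [PySem.Dict.contains_insert]
        have hne : (key b == key a) = false := by
          simp only [beq_eq_false_iff_ne, ne_eq]
          intro h; exact hna ⟨b, hb, h⟩
        simp [hne, hfresh b (List.mem_cons_of_mem _ hb)]
      simp only [List.foldl_cons, if_pos hp, List.filter_cons, decide_eq_true hp]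
      rw [ih _ hnd hfresh', PySem.Dict.items_insert_of_not_contains _ _ hfa]
      simp
    · simp only [List.foldl_cons, if_neg hp, List.filter_cons, decide_eq_false hp]
      exact ih _ hnd (fun b hb => hfresh b (List.mem_cons_of_mem _ hb))

-- B's merge-join diff, written as one filter-and-map over d0

theorem diffFields_eq (d0 d1 : List (String × String))
    (h0 : (d0.map Prod.fst).Nodup) (h1 : (d1.map Prod.fst).Nodup) :
    diffFields d0 d1
      = (d0.filter (fun kv => kv.2 ≠ (PySem.Dict.mk d1).getD kv.1 "")).map
          (fun kv => (kv.1, [("V0", kv.2), ("V1", (PySem.Dict.mk d1).getD kv.1 "")])) := by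
  unfold diffFields
  dsimp only
  rw [fields_items d0 d1 h0 h1]
  rw [foldl_insert_if_items (d0.map (fun kv => (kv.1, (kv.2, (PySem.Dict.mk d1).getD kv.1 ""))))
      Prod.fst (fun kp => kp.2.1 ≠ kp.2.2)
      (fun kp => [("V0", kp.2.1), ("V1", kp.2.2)]) PySem.Dict.empty
      (by simpa [Function.comp_def] using h0) (fun a _ => PySem.Dict.contains_empty _)]
  rw [List.filter_map, List.map_map]
  have : (PySem.Dict.empty : PySem.Dict String (List (String × String))).items = [] := rfl
  rw [this, List.nil_append]
  rfl

-- A's inner changes dict, listed out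

theorem aChanges_items (data : List (String × String)) (e : List (String × String))
    (hnd : (data.map Prod.fst).Nodup) :
    (aChanges (PySem.Dict.mk data) (PySem.Dict.mk e)).items
      = (data.filter (fun kv => kv.2 ≠ (PySem.Dict.mk e).getD kv.1 "")).map
          (fun kv => (kv.1, [("V0", kv.2), ("V1", (PySem.Dict.mk e).getD kv.1 "")])) := by
  have hndk : ((PySem.Dict.mk data).keys).Nodup := by
    simpa [PySem.Dict.keys_mk] using hnd
  have hget : ∀ kv ∈ data, (PySem.Dict.mk data).getD kv.1 "" = kv.2 := by
    intro kv hkv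
    exact PySem.Dict.getD_of_mem_items _ (by simpa using hkv) hndk ""
  unfold aChanges
  rw [PySem.Dict.keys_mk, List.foldl_map]
  rw [foldl_insert_if_items data (fun kv => kv.1)
        (fun kv => (PySem.Dict.mk data).getD kv.1 "" ≠ (PySem.Dict.mk e).getD kv.1 "")
        (fun kv => [("V0", (PySem.Dict.mk data).getD kv.1 ""), ("V1", (PySem.Dict.mk e).getD kv.1 "")])
        PySem.Dict.empty (by simpa using hnd) (fun a _ => PySem.Dict.contains_empty _)]
  have hfilt : data.filter
      (fun kv => decide ((PySem.Dict.mk data).getD kv.1 "" ≠ (PySem.Dict.mk e).getD kv.1 ""))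
      = data.filter (fun kv => kv.2 ≠ (PySem.Dict.mk e).getD kv.1 "") := by
    refine List.filter_congr ?_
    intro kv hkv
    rw [hget kv hkv]
  rw [hfilt]
  have : (PySem.Dict.empty : PySem.Dict String (List (String × String))).items = [] := rfl
  rw [this, List.nil_append]
  refine List.map_congr_left ?_
  intro kv hkv
  rw [hget kv (List.mem_filter.mp hkv).1]

theorem mar_split (L : List (String × (Option (List (String × String)) × Option (List (String × String)))))
    (m : PySem.Dict String (List (String × List (String × String))))
    (a r : PySem.Dict String (List (String × String))) :
    L.foldl
      (fun (acc : PySem.Dict String (List (String × List (String × String))) ×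
                  PySem.Dict String (List (String × String)) ×
                  PySem.Dict String (List (String × String))) kp =>
        match kp.2.1, kp.2.2 with
        | none, o1 => (acc.1, acc.2.1.insert kp.1 (o1.getD []), acc.2.2)
        | some p0, none => (acc.1, acc.2.1, acc.2.2.insert kp.1 p0)
        | some p0, some p1 =>
          let changes := diffFields p0 p1
          if changes ≠ [] then (acc.1.insert kp.1 changes, acc.2.1, acc.2.2) else acc)
      (m, a, r)
    = (L.foldl (fun m kp =>
          if kp.2.1.isSome = true ∧ kp.2.2.isSome = true ∧
              diffFields (kp.2.1.getD []) (kp.2.2.getD []) ≠ [] then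
            m.insert kp.1 (diffFields (kp.2.1.getD []) (kp.2.2.getD [])) else m) m,
       L.foldl (fun a kp => if kp.2.1 = none then a.insert kp.1 (kp.2.2.getD []) else a) a,
       L.foldl (fun r kp =>
          if kp.2.1.isSome = true ∧ kp.2.2 = none then r.insert kp.1 (kp.2.1.getD []) else r) r) := by
  induction L generalizing m a r with
  | nil => rfl
  | cons kp L ih =>
    obtain ⟨k, o0, o1⟩ := kp
    rcases o0 with _ | p0 <;> rcases o1 with _ | p1 <;>
      simp only [List.foldl_cons, Option.isSome_none, Option.isSome_some, Option.getD_some,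
        Option.getD_none]
    · rw [ih]; simp
    · rw [ih]; simp
    · rw [ih]; simp
    · by_cases hd : diffFields p0 p1 ≠ []
      · rw [if_pos hd]
        rw [ih]
        simp [hd]
      · rw [if_neg hd]
        rw [ih]
        simp [hd]

theorem mr_fold_split (bom_v0 : List (String × List (String × String)))
    (d1 : PySem.Dict String (List (String × String)))
    (m : PySem.Dict String (List (String × List (String × String))))
    (r : PySem.Dict String (List (String × String))) :
    bom_v0.foldl
      (fun (mr : PySem.Dict String (List (String × List (String × String))) ×
                 PySem.Dict String (List (String × String))) rd =>
        if d1.contains rd.1 then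
          let changes := aChanges (PySem.Dict.mk rd.2) (PySem.Dict.mk (d1.getD rd.1 []))
          if changes.items ≠ [] then (mr.1.insert rd.1 changes.items, mr.2) else mr
        else (mr.1, mr.2.insert rd.1 rd.2)) (m, r)
    = (bom_v0.foldl
        (fun m rd =>
          if d1.contains rd.1 ∧
              (aChanges (PySem.Dict.mk rd.2) (PySem.Dict.mk (d1.getD rd.1 []))).items ≠ [] then
            m.insert rd.1 (aChanges (PySem.Dict.mk rd.2) (PySem.Dict.mk (d1.getD rd.1 []))).items
          else m) m,
       bom_v0.foldl (fun r rd => if ¬ d1.contains rd.1 then r.insert rd.1 rd.2 else r) r) := by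
  induction bom_v0 generalizing m r with
  | nil => rfl
  | cons rd l ih =>
    simp only [List.foldl_cons]
    rw [← ih]
    congr 1
    by_cases h : d1.contains rd.1 <;>
      by_cases h2 : (aChanges (PySem.Dict.mk rd.2) (PySem.Dict.mk (d1.getD rd.1 []))).items ≠ [] <;>
      simp [h, h2]

theorem main_eq (bom_v0 bom_v1 : List (String × List (String × String)))
    (h0 : (bom_v0.map Prod.fst).Nodup) (h1 : (bom_v1.map Prod.fst).Nodup)
    (hin0 : ∀ rd ∈ bom_v0, (rd.2.map Prod.fst).Nodup)
    (hin1 : ∀ rd ∈ bom_v1, (rd.2.map Prod.fst).Nodup) :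
    compare_boms bom_v0 bom_v1 = compare_boms_alt bom_v0 bom_v1 := by
  simp only [compare_boms, compare_boms_alt]
  rw [mr_fold_split, slots_items bom_v0 bom_v1 h0 h1, mar_split]
  have hdisj2 : ∀ x ∈ bom_v0.map Prod.fst,
      x ∉ (bom_v1.filter (fun rd => (PySem.Dict.mk bom_v0).contains rd.1 = false)).map Prod.fst := by
    intro x hx hy
    obtain ⟨rd, hrd, hrdx⟩ := List.mem_map.mp hy
    have hcf := (List.mem_filter.mp hrd).2
    simp only [decide_eq_true_eq] at hcf
    rw [hrdx] at hcf
    rw [(contains_mk_iff bom_v0 x).mpr hx] at hcf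
    exact Bool.noConfusion hcf
  have hSnd : ((bom_v0.map (fun rd => (rd.1, (some rd.2, (PySem.Dict.mk bom_v1).get? rd.1)))
      ++ (bom_v1.filter (fun rd => (PySem.Dict.mk bom_v0).contains rd.1 = false)).map
          (fun rd => (rd.1, ((none : Option (List (String × String))), some rd.2)))).map Prod.fst).Nodup := by
    rw [List.map_append, List.map_map, List.map_map]
    have e0 : (Prod.fst ∘ fun (rd : String × List (String × String)) =>
        (rd.1, (some rd.2, (PySem.Dict.mk bom_v1).get? rd.1))) = Prod.fst := rfl
    have e1 : (Prod.fst ∘ fun (rd : String × List (String × String)) =>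
        (rd.1, ((none : Option (List (String × String))), some rd.2))) = Prod.fst := rfl
    rw [e0, e1, List.nodup_append]
    exact ⟨h0, (List.filter_sublist.map Prod.fst).nodup h1,
      fun x hx y hy hxy => hdisj2 x hx (hxy ▸ hy)⟩
  have hval : ∀ rd ∈ bom_v0, (PySem.Dict.mk bom_v1).contains rd.1 = true →
      (aChanges (PySem.Dict.mk rd.2) (PySem.Dict.mk ((PySem.Dict.mk bom_v1).getD rd.1 []))).items
        = diffFields rd.2 (((PySem.Dict.mk bom_v1).get? rd.1).getD []) := by
    intro rd hrd hc
    have hs : ((PySem.Dict.mk bom_v1).get? rd.1).isSome = true := by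
      rw [← PySem.Dict.contains_eq_isSome_get?]; exact hc
    obtain ⟨e, he⟩ := Option.isSome_iff_exists.mp hs
    have hgd : (PySem.Dict.mk bom_v1).getD rd.1 [] = e := by
      rw [PySem.Dict.getD_eq_get?_getD, he]; rfl
    have hmem : (rd.1, e) ∈ bom_v1 := PySem.Dict.mem_items_of_get?_eq_some _ he
    rw [hgd, he, Option.getD_some,
      aChanges_items rd.2 e (hin0 rd hrd),
      diffFields_eq rd.2 e (hin0 rd hrd) (hin1 (rd.1, e) hmem)]
  dsimp only
  refine Prod.ext ?_ (Prod.ext ?_ ?_) <;> dsimp only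
  · -- modified
    rw [foldl_insert_if_items bom_v0 Prod.fst
        (fun rd => (PySem.Dict.mk bom_v1).contains rd.1 = true ∧
          (aChanges (PySem.Dict.mk rd.2) (PySem.Dict.mk ((PySem.Dict.mk bom_v1).getD rd.1 []))).items ≠ [])
        (fun rd => (aChanges (PySem.Dict.mk rd.2) (PySem.Dict.mk ((PySem.Dict.mk bom_v1).getD rd.1 []))).items)
        PySem.Dict.empty h0 (fun a _ => PySem.Dict.contains_empty _),
      foldl_insert_if_items _ Prod.fst
        (fun kp => kp.2.1.isSome = true ∧ kp.2.2.isSome = true ∧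
          diffFields (kp.2.1.getD []) (kp.2.2.getD []) ≠ [])
        (fun kp => diffFields (kp.2.1.getD []) (kp.2.2.getD []))
        PySem.Dict.empty hSnd (fun a _ => PySem.Dict.contains_empty _)]
    have hem : (PySem.Dict.empty : PySem.Dict String (List (String × List (String × String)))).items = [] := rfl
    rw [hem, List.nil_append, List.nil_append, List.filter_append, List.filter_map, List.filter_map,
      List.map_append, List.map_map, List.map_map]
    have h2nil : (bom_v1.filter (fun rd => (PySem.Dict.mk bom_v0).contains rd.1 = false)).filter
        ((fun kp => decide ((kp.2.1 : Option (List (String × String))).isSome = true ∧ kp.2.2.isSome = true ∧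
          diffFields (kp.2.1.getD []) (kp.2.2.getD []) ≠ [])) ∘
          (fun rd => (rd.1, ((none : Option (List (String × String))), some rd.2)))) = [] := by
      refine List.filter_eq_nil_iff.mpr ?_
      intro rd _
      simp [Function.comp]
    rw [h2nil, List.map_nil, List.append_nil]
    have hpred : ∀ rd ∈ bom_v0,
        decide ((PySem.Dict.mk bom_v1).contains rd.1 = true ∧
          (aChanges (PySem.Dict.mk rd.2) (PySem.Dict.mk ((PySem.Dict.mk bom_v1).getD rd.1 []))).items ≠ [])
        = ((fun kp => decide ((kp.2.1 : Option (List (String × String))).isSome = true ∧ kp.2.2.isSome = true ∧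
            diffFields (kp.2.1.getD []) (kp.2.2.getD []) ≠ [])) ∘
            (fun rd => (rd.1, (some rd.2, (PySem.Dict.mk bom_v1).get? rd.1)))) rd := by
      intro rd hrd
      simp only [Function.comp, decide_eq_decide, Option.isSome_some, Option.getD_some, true_and]
      rw [PySem.Dict.contains_eq_isSome_get?]
      by_cases hc : ((PySem.Dict.mk bom_v1).get? rd.1).isSome = true
      · have hc' : (PySem.Dict.mk bom_v1).contains rd.1 = true := by
          rw [PySem.Dict.contains_eq_isSome_get?]; exact hc
        rw [hval rd hrd hc']
      · simp [hc]
    rw [List.filter_congr hpred]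
    refine List.map_congr_left ?_
    intro rd hrd
    obtain ⟨hrd0, hq⟩ := List.mem_filter.mp hrd
    simp only [Function.comp, decide_eq_true_eq, Option.isSome_some, Option.getD_some,
      true_and] at hq
    have hc : (PySem.Dict.mk bom_v1).contains rd.1 = true := by
      rw [PySem.Dict.contains_eq_isSome_get?]; exact hq.1
    simp [Function.comp, hval rd hrd0 hc]
  · -- added
    have hsw : (fun (a : PySem.Dict String (List (String × String))) (rd : String × List (String × String)) =>
          if (PySem.Dict.mk bom_v0).contains rd.1 then a else a.insert rd.1 rd.2)
        = (fun a rd => if ¬ (PySem.Dict.mk bom_v0).contains rd.1 then a.insert rd.1 rd.2 else a) := by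
      funext a rd
      by_cases h : (PySem.Dict.mk bom_v0).contains rd.1 <;> simp [h]
    rw [hsw,
      foldl_insert_if_items bom_v1 Prod.fst
        (fun rd => ¬ (PySem.Dict.mk bom_v0).contains rd.1)
        Prod.snd PySem.Dict.empty h1 (fun a _ => PySem.Dict.contains_empty _),
      foldl_insert_if_items _ Prod.fst
        (fun kp => kp.2.1 = (none : Option (List (String × String))))
        (fun kp => kp.2.2.getD []) PySem.Dict.empty hSnd (fun a _ => PySem.Dict.contains_empty _)]
    have hem : (PySem.Dict.empty : PySem.Dict String (List (String × String))).items = [] := rfl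
    rw [hem, List.nil_append, List.nil_append, List.filter_append, List.filter_map, List.filter_map,
      List.map_append, List.map_map, List.map_map]
    have h1nil : (bom_v0.filter
        ((fun kp => decide ((kp.2.1 : Option (List (String × String))) = none)) ∘
          (fun rd => (rd.1, (some rd.2, (PySem.Dict.mk bom_v1).get? rd.1))))) = [] := by
      refine List.filter_eq_nil_iff.mpr ?_
      intro rd _
      simp [Function.comp]
    rw [h1nil, List.map_nil, List.nil_append, List.filter_filter]
    have : (bom_v1.filter (fun rd => decide (¬(PySem.Dict.mk bom_v0).contains rd.1 = true)))
        = bom_v1.filter (fun rd =>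
            (((fun kp => decide ((kp.2.1 : Option (List (String × String))) = none)) ∘
               (fun rd => (rd.1, ((none : Option (List (String × String))), some rd.2)))) rd &&
             decide ((PySem.Dict.mk bom_v0).contains rd.1 = false))) := by
      refine List.filter_congr ?_
      intro rd _
      simp [Function.comp]
    rw [this]
    refine List.map_congr_left ?_
    intro rd _
    simp [Function.comp]
  · -- removed
    rw [foldl_insert_if_items bom_v0 Prod.fst
        (fun rd => ¬ (PySem.Dict.mk bom_v1).contains rd.1)
        Prod.snd PySem.Dict.empty h0 (fun a _ => PySem.Dict.contains_empty _),
      foldl_insert_if_items _ Prod.fst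
        (fun kp => (kp.2.1 : Option (List (String × String))).isSome = true ∧
          (kp.2.2 : Option (List (String × String))) = none)
        (fun kp => kp.2.1.getD []) PySem.Dict.empty hSnd (fun a _ => PySem.Dict.contains_empty _)]
    have hem : (PySem.Dict.empty : PySem.Dict String (List (String × String))).items = [] := rfl
    rw [hem, List.nil_append, List.nil_append, List.filter_append, List.filter_map, List.filter_map,
      List.map_append, List.map_map, List.map_map]
    have h2nil : ((bom_v1.filter (fun rd => (PySem.Dict.mk bom_v0).contains rd.1 = false)).filter
        ((fun kp => decide ((kp.2.1 : Option (List (String × String))).isSome = true ∧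
          (kp.2.2 : Option (List (String × String))) = none)) ∘
          (fun rd => (rd.1, ((none : Option (List (String × String))), some rd.2))))) = [] := by
      refine List.filter_eq_nil_iff.mpr ?_
      intro rd _
      simp [Function.comp]
    rw [h2nil, List.map_nil, List.append_nil]
    have hpred : ∀ rd ∈ bom_v0,
        decide (¬(PySem.Dict.mk bom_v1).contains rd.1 = true)
        = ((fun kp => decide ((kp.2.1 : Option (List (String × String))).isSome = true ∧
            (kp.2.2 : Option (List (String × String))) = none)) ∘
            (fun rd => (rd.1, (some rd.2, (PySem.Dict.mk bom_v1).get? rd.1)))) rd := by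
      intro rd _
      simp only [Function.comp, decide_eq_decide, Option.isSome_some]
      rw [PySem.Dict.contains_eq_isSome_get?]
      rcases hh : (PySem.Dict.mk bom_v1).get? rd.1 with _ | w <;> simp
    rw [List.filter_congr hpred]
    refine List.map_congr_left ?_
    intro rd _
    simp [Function.comp]

-- ===== VERDICT =====
theorem compare_boms_spec : Claim_equal_compare_boms := by
  intro bom_v0 bom_v1 _ hpre
  obtain ⟨h0, h1, hin0, hin1⟩ := hpre
  unfold Spec_compare_boms
  exact main_eq bom_v0 bom_v1 h0 h1 hin0 hin1
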